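-- pv_equiv track=rewrite | github.com/Hunter-Dinan/cp1404practicals | prac_09/cleanup_files.py | get_fixed_filename_correction_4
-- ===== SOURCE A (Python) =====
-- def get_fixed_filename_correction_4(filename):
--     """Add uppercase after '(', e.g. Blue_Dog_(jerry) -> Blue_Dog_(Jerry)."""
--     fixed_filename = ''
--     slice_index = 0
--     for i, char in enumerate(filename):
--         if i > 0:
--             if filename[i - 1] == '(':
--                 fixed_name_part = filename[slice_index:i] + char.upper()
--                 slice_index = i + 1
--                 fixed_filename += fixed_name_part
--     fixed_filename = fixed_filename + filename[slice_index:]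
--     return fixed_filename
-- ===== SOURCE B (Python) =====
-- def get_fixed_filename_correction_4(filename):
--     """Add uppercase after '(', e.g. Blue_Dog_(jerry) -> Blue_Dog_(Jerry)."""
--     parts = filename.split('(')
--     fixed_parts = [parts[0]]
--     for part in parts[1:]:
--         fixed_parts.append(part[0].upper() + part[1:] if part else part)
--     return '('.join(fixed_parts)
-- ===== Notes on version B (the rewrite author's own statement) =====
-- stated objective: faster
-- what changed: B splits the filename on the open-parenthesis separator and uppercases the first character of each segment after the first before rejoining, replacing A's per-character Python enumerate loop (running slice index, repeated slicing and concatenation) with C-level split/join, a constant-factor speedup measured.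
import Mathlib
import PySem

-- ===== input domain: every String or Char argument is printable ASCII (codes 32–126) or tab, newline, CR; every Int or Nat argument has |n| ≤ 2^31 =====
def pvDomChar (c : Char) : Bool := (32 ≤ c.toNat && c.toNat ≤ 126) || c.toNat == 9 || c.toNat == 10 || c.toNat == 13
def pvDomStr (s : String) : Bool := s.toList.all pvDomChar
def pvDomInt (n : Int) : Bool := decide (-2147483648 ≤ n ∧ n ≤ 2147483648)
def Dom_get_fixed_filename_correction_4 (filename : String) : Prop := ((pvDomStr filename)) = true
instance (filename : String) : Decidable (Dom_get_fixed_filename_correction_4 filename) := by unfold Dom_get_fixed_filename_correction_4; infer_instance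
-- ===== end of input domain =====

-- B splits on the separator and uppercases each later segment's first character before
-- rejoining, instead of A's per-character scan with a running slice index (the timing
-- run measured B faster by a constant factor).

-- ===== PORT A =====
-- loop body of A's for-loop (acc = (fixed_filename, slice_index), p = (i, char))
def pvStepA (s : List Char) (acc : List Char × Int) (p : Int × Char) : List Char × Int :=
  if p.1 > 0 then
    if PySem.List.pyGet? s (p.1 - 1) == some '(' then
      (acc.1 ++ (PySem.List.slice s (some acc.2) (some p.1) ++ PySem.Chars.upper [p.2]), p.1 + 1)
    else acc
  else acc

def get_fixed_filename_correction_4 (filename : String) : String :=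
  let s := filename.toList
  let st := (PySem.List.enumerate s 0).foldl (pvStepA s) ([], 0)
  String.ofList (st.1 ++ PySem.List.slice s (some st.2) none)

-- ===== PORT B =====
-- part[0].upper() + part[1:] if part else part
def pvFixPart (part : List Char) : List Char :=
  match part with
  | [] => part
  | c :: rest => PySem.Chars.upper [c] ++ rest

def get_fixed_filename_correction_4_alt (filename : String) : String :=
  match filename.toList.splitOn '(' with
  | [] => ""      -- unreachable: split never returns an empty list
  | p0 :: rest => String.ofList (PySem.Chars.join ['('] (p0 :: rest.map pvFixPart))

-- ===== PRECONDITION & SPEC =====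
def Spec_get_fixed_filename_correction_4 (filename : String) (out : String) : Prop := out = get_fixed_filename_correction_4_alt filename
instance (filename : String) (out : String) : Decidable (Spec_get_fixed_filename_correction_4 filename out) := by unfold Spec_get_fixed_filename_correction_4; infer_instance

-- ===== CLAIM (what is proved, stated in full; the proofs are below) =====
def Claim_equal_get_fixed_filename_correction_4 : Prop := ∀ (filename : String), Dom_get_fixed_filename_correction_4 filename → Spec_get_fixed_filename_correction_4 filename (get_fixed_filename_correction_4 filename)

-- ===== LEMMAS AND PROOFS =====

-- common specification: uppercase every char whose predecessor is '(' (flag = "previous char was '('")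
def fixGo : Bool → List Char → List Char
  | _, [] => []
  | b, c :: rest => (if b then PySem.Chars.upperChar c else c) :: fixGo (c == '(') rest

def flagAfter (b : Bool) : List Char → Bool
  | [] => b
  | c :: rest => flagAfter (c == '(') rest

theorem fixGo_append (t : List Char) : ∀ (b : Bool) (u : List Char),
    fixGo b (t ++ u) = fixGo b t ++ fixGo (flagAfter b t) u := by
  induction t with
  | nil => intro b u; simp [fixGo, flagAfter]
  | cons c rest ih => intro b u; simp [fixGo, flagAfter, ih]

theorem flagAfter_ne_nil (t : List Char) (b : Bool) (h : t ≠ []) :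
    flagAfter b t = (t.getLast h == '(') := by
  induction t generalizing b with
  | nil => exact absurd rfl h
  | cons c rest ih =>
    cases rest with
    | nil => simp [flagAfter]
    | cons d r => simpa [flagAfter] using ih (c == '(') (by simp)

theorem fixGo_id : ∀ (t : List Char), (∀ i, (hi : i + 1 < t.length) → t[i] ≠ '(') →
    fixGo false t = t
  | [], _ => rfl
  | [c], _ => rfl
  | c :: d :: rest, h => by
    have hc : c ≠ '(' := h 0 (by simp)
    have hcb : (c == '(') = false := by simpa using hc
    simp only [fixGo, if_neg (by simp : ¬ (false = true)), hcb]
    exact congrArg (c :: ·) (fixGo_id (d :: rest) (fun i hi => by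
      have := h (i + 1) (by simpa using hi)
      simpa using this))

-- the flag after a prefix s.take j is false under the no-flush hypothesis
theorem flag_take_false (s : List Char) (j k : Nat) (hjk : j < k) (hk : k ≤ s.length)
    (hflush : ∀ q : Nat, (hq : q < s.length) → j ≤ q + 1 → q + 2 ≤ k → s[q] ≠ '(') :
    flagAfter false (s.take j) = false := by
  cases j with
  | zero => simp [flagAfter]
  | succ j' =>
    have hlen : j' + 1 ≤ s.length := le_trans (le_of_lt hjk) hk
    have hne : s.take (j' + 1) ≠ [] := by
      apply List.ne_nil_of_length_pos
      simp; omega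
    rw [flagAfter_ne_nil _ _ hne, List.getLast_eq_getElem]
    have hlt : (s.take (j' + 1)).length - 1 < (s.take (j' + 1)).length := by
      simp; omega
    have hlen' : (s.take (j' + 1)).length = j' + 1 := by simp; omega
    have : (s.take (j' + 1))[(s.take (j' + 1)).length - 1] = s[j']'(by omega) := by
      simp [List.getElem_take, hlen']
    rw [this]
    have := hflush j' (by omega) (by omega) (by omega)
    simpa using this

-- middle segment (s.take k).drop j is untouched by fixGo under the no-flush hypothesis
theorem fixGo_mid (s : List Char) (j k : Nat) (hjk : j ≤ k) (hk : k ≤ s.length)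
    (hflush : ∀ q : Nat, (hq : q < s.length) → j ≤ q + 1 → q + 2 ≤ k → s[q] ≠ '(') :
    fixGo false ((s.take k).drop j) = (s.take k).drop j := by
  apply fixGo_id
  intro i hi
  have hlen : ((s.take k).drop j).length = k - j := by simp; omega
  have hji : j + i < s.length := by omega
  have : ((s.take k).drop j)[i] = s[j + i]'hji := by
    simp [List.getElem_drop, List.getElem_take]
  rw [this]
  exact hflush (j + i) hji (by omega) (by omega)

-- split of fixGo at an unflushed boundary
theorem fixGo_take_split (s : List Char) (j k : Nat) (hjk : j ≤ k) (hk : k ≤ s.length)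
    (hflush : ∀ q : Nat, (hq : q < s.length) → j ≤ q + 1 → q + 2 ≤ k → s[q] ≠ '(') :
    fixGo false (s.take k) = fixGo false (s.take j) ++ (s.take k).drop j := by
  rcases eq_or_lt_of_le hjk with rfl | hlt
  · simp
  · rw [List.drop_take]
    conv_lhs => rw [show k = j + (k - j) from by omega]
    rw [List.take_add, fixGo_append, flag_take_false s j k hlt hk hflush]
    congr 1
    have := fixGo_mid s j k hjk hk hflush
    rw [List.drop_take] at this
    exact this

-- ============ A-side loop invariant ============
theorem loopA (s : List Char) : ∀ (n k j : Nat), k + n = s.length → j ≤ k →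
    (∀ q : Nat, (hq : q < s.length) → j ≤ q + 1 → q + 2 ≤ k → s[q] ≠ '(') →
    (let st := (PySem.List.enumerate (s.drop k) (k : Int)).foldl (pvStepA s)
                 (fixGo false (s.take j), (j : Int))
     st.1 ++ PySem.List.slice s (some st.2) none) = fixGo false s := by
  intro n
  induction n with
  | zero =>
    intro k j hkn hjk hflush
    have hk : k = s.length := by omega
    subst hk
    simp only [List.drop_length, PySem.List.enumerate, List.foldl_nil]
    rw [PySem.List.slice_from s (by positivity)]
    simp only [Int.toNat_natCast]
    have : fixGo false s = fixGo false (s.take s.length) := by simp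
    rw [this, fixGo_take_split s j s.length hjk (le_refl _) hflush]
    simp
  | succ n ih =>
    intro k j hkn hjk hflush
    have hk : k < s.length := by omega
    rw [List.drop_eq_getElem_cons hk, PySem.List.enumerate_cons, List.foldl_cons]
    by_cases hk0 : k = 0
    · -- i = 0: loop body does nothing
      subst hk0
      have hj0 : j = 0 := by omega
      subst hj0
      have hstep : pvStepA s (fixGo false (s.take 0), ((0 : Nat) : Int)) (((0 : Nat) : Int), s[0]) =
          (fixGo false (s.take 0), ((0 : Nat) : Int)) := by
        simp [pvStepA]
      rw [hstep]
      have := ih 1 0 (by omega) (by omega) (fun q hq h1 h2 => by omega)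
      simpa using this
    · have hk1 : k - 1 < s.length := by omega
      have hcast : (k : Int) - 1 = ((k - 1 : Nat) : Int) := by omega
      have hget : PySem.List.pyGet? s ((k : Int) - 1) = some (s[k-1]'hk1) := by
        rw [hcast, PySem.List.pyGet?_natCast, List.getElem?_eq_getElem hk1]
      by_cases hpar : s[k-1]'hk1 = '('
      · -- flush step
        have hstep : pvStepA s (fixGo false (s.take j), (j : Int)) ((k : Int), s[k]'hk) =
            (fixGo false (s.take j) ++
              (PySem.List.slice s (some (j:Int)) (some (k:Int)) ++ PySem.Chars.upper [s[k]'hk]),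
             (k : Int) + 1) := by
          simp [pvStepA, hget, hpar]
          intro h
          exact absurd h hk0
        rw [hstep]
        have hfix : fixGo false (s.take j) ++
            (PySem.List.slice s (some (j:Int)) (some (k:Int)) ++ PySem.Chars.upper [s[k]'hk]) =
            fixGo false (s.take (k + 1)) := by
          rw [PySem.List.slice_natCast]
          have htk : s.take (k + 1) = s.take k ++ [s[k]'hk] := by
            rw [List.take_add_one, List.getElem?_eq_getElem hk]; rfl
          rw [htk, fixGo_append]
          have hflag : flagAfter false (s.take k) = true := by
            have hne : s.take k ≠ [] := by
              apply List.ne_nil_of_length_pos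
              simp; omega
            rw [flagAfter_ne_nil _ _ hne, List.getLast_eq_getElem]
            have hlenk : (s.take k).length = k := by simp; omega
            have : (s.take k)[(s.take k).length - 1] = s[k-1]'hk1 := by
              simp [List.getElem_take, hlenk]
            rw [this]
            simp [hpar]
          rw [hflag]
          have : fixGo true [s[k]'hk] = PySem.Chars.upper [s[k]'hk] := by
            simp [fixGo, PySem.Chars.upper]
          rw [this, fixGo_take_split s j k hjk (le_of_lt hk) hflush, List.drop_take]
          simp
        rw [hfix]
        have hcast2 : (k : Int) + 1 = ((k + 1 : Nat) : Int) := by omega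
        rw [hcast2]
        exact ih (k + 1) (k + 1) (by omega) (le_refl _)
          (fun q hq h1 h2 => by omega)
      · -- no flush
        have hstep : pvStepA s (fixGo false (s.take j), (j : Int)) ((k : Int), s[k]'hk) =
            (fixGo false (s.take j), (j : Int)) := by
          simp [pvStepA, hget, hpar]
        rw [hstep]
        exact ih (k + 1) j (by omega) (by omega)
          (fun q hq h1 h2 => by
            by_cases hq2 : q + 2 ≤ k
            · exact hflush q hq h1 hq2
            · have : q = k - 1 := by omega
              subst this; exact hpar)

-- ============ B-side characterization ============
theorem join_cons_head (sep : List Char) (c : Char) (q : List Char) (L : List (List Char)) :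
    PySem.Chars.join sep ((c :: q) :: L) = c :: PySem.Chars.join sep (q :: L) := by
  cases L with
  | nil => simp [PySem.Chars.join_singleton]
  | cons x xs => simp [PySem.Chars.join_cons_cons]

theorem splitB : ∀ (s : List Char),
    (∀ p0 rest, s.splitOn '(' = p0 :: rest →
      PySem.Chars.join ['('] (p0 :: rest.map pvFixPart) = fixGo false s)
    ∧ PySem.Chars.join ['('] ((s.splitOn '(').map pvFixPart) = fixGo true s := by
  intro s
  induction s with
  | nil =>
    constructor
    · intro p0 rest h
      simp [List.splitOn, List.splitOnP_nil] at h
      rw [h.1, h.2]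
      simp [PySem.Chars.join_singleton, fixGo]
    · simp [List.splitOn, List.splitOnP_nil, pvFixPart, PySem.Chars.join_singleton, fixGo]
  | cons c s ih =>
    obtain ⟨q0, qrest, hq⟩ : ∃ q0 qrest, s.splitOn '(' = q0 :: qrest := by
      cases h : s.splitOn '(' with
      | nil => exact absurd h (List.splitOnP_ne_nil _ _)
      | cons a b => exact ⟨a, b, rfl⟩
    by_cases hc : c = '('
    · subst hc
      have hsplit : ('(' :: s).splitOn '(' = [] :: s.splitOn '(' := by
        simp [List.splitOn, List.splitOnP_cons]
      constructor
      · intro p0 rest h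
        rw [hsplit] at h
        injection h with h1 h2
        subst h1; subst h2
        rw [hq]
        simp only [List.map_cons]
        rw [PySem.Chars.join_cons_cons]
        have := (ih).2
        rw [hq] at this
        simp only [List.map_cons] at this
        simp only [List.nil_append, fixGo, beq_self_eq_true, if_neg (by simp : ¬ (false = true))]
        rw [← this]
        rfl
      · rw [hsplit, hq]
        simp only [List.map_cons, pvFixPart]
        rw [PySem.Chars.join_cons_cons]
        have := (ih).2
        rw [hq] at this
        simp only [List.map_cons] at this
        rw [List.nil_append]
        simp only [fixGo, beq_self_eq_true]
        have hup : PySem.Chars.upperChar '(' = '(' := by decide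
        rw [hup, ← this]
        rfl
    · have hcb : (c == '(') = false := by simpa using hc
      have hsplit : (c :: s).splitOn '(' = (c :: q0) :: qrest := by
        simp [List.splitOn, List.splitOnP_cons, hcb]
        rw [show List.splitOnP (fun x => x == '(') s = s.splitOn '(' from rfl, hq]
        rfl
      constructor
      · intro p0 rest h
        rw [hsplit] at h
        injection h with h1 h2
        subst h1; subst h2
        rw [join_cons_head, (ih).1 q0 qrest hq]
        simp [fixGo, hcb]
      · rw [hsplit]
        simp only [pvFixPart, PySem.Chars.upper, List.map]
        rw [List.cons_append, List.nil_append, join_cons_head, (ih).1 q0 qrest hq]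
        simp [fixGo, hcb]

-- both ports compute fixGo false
theorem portA_eq (filename : String) :
    get_fixed_filename_correction_4 filename = String.ofList (fixGo false filename.toList) := by
  unfold get_fixed_filename_correction_4
  have := loopA filename.toList filename.toList.length 0 0 (by omega) (le_refl 0)
    (fun q hq h1 h2 => by omega)
  simp only [List.drop_zero, List.take_zero] at this
  simp only []
  rw [show fixGo false ([] : List Char) = [] from rfl] at this
  rw [show ((0 : Nat) : Int) = (0 : Int) from rfl] at this
  exact congrArg String.ofList this

theorem portB_eq (filename : String) :
    get_fixed_filename_correction_4_alt filename = String.ofList (fixGo false filename.toList) := by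
  unfold get_fixed_filename_correction_4_alt
  cases h : filename.toList.splitOn '(' with
  | nil => exact absurd h (List.splitOnP_ne_nil _ _)
  | cons p0 rest =>
    exact congrArg String.ofList ((splitB filename.toList).1 p0 rest h)

-- ===== VERDICT (by name: the statement is the Claim_ definition above) =====
theorem get_fixed_filename_correction_4_spec : Claim_equal_get_fixed_filename_correction_4 := by
  intro filename _
  unfold Spec_get_fixed_filename_correction_4
  rw [portA_eq, portB_eq]
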